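-- pv_equiv track=rewrite | github.com/mpilhlt/pdf-tei-editor | fastapi_app/lib/utils/hash_utils.py | find_safe_hash_length
-- ===== SOURCE A (Python) =====
-- def find_safe_hash_length(all_hashes: set) -> int:
--     """
--     Find minimum hash length to avoid collisions (legacy function).
--
--     Args:
--         all_hashes: Set of all full hashes
--
--     Returns:
--         Minimum hash length that avoids collisions
--     """
--     if not all_hashes:
--         return 5
--
--     hash_length = 5
--     max_length = len(next(iter(all_hashes))) if all_hashes else 32
--
--     while hash_length <= max_length:
--         shortened_hashes = {h[:hash_length] for h in all_hashes}
--         if len(shortened_hashes) == len(all_hashes):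
--             # No collisions at this length
--             break
--         hash_length += 1
--
--     return hash_length
-- ===== SOURCE B (Python) =====
-- def _lcp(a, b):
--     if a and b and a[0] == b[0]:
--         return 1 + _lcp(a[1:], b[1:])
--     return 0
--
--
-- def find_safe_hash_length(all_hashes: set) -> int:
--     """Find minimum hash length to avoid collisions: one pass over pairs of
--     hashes taking the longest common prefix m; answer is max(5, m + 1)."""
--     m = 0
--     seen = []
--     for h in all_hashes:
--         for p in seen:
--             m = max(m, _lcp(h, p))
--         seen.append(h)
--     return max(5, m + 1)
-- ===== Notes on version B (the rewrite author's own statement) =====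
-- stated objective: alternative
-- what changed: Instead of A's outer loop over candidate lengths that rebuilds a set of truncated hashes at every length, B makes one pass over the pairs of hashes, takes the longest common prefix length m of any pair, and returns max(5, m + 1) in closed form.
-- outside the precondition, e.g. on find_safe_hash_length({'z', 'aaaaaaac', 'aaaaaaab'}): A returns 8, B returns 8
import Mathlib
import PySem

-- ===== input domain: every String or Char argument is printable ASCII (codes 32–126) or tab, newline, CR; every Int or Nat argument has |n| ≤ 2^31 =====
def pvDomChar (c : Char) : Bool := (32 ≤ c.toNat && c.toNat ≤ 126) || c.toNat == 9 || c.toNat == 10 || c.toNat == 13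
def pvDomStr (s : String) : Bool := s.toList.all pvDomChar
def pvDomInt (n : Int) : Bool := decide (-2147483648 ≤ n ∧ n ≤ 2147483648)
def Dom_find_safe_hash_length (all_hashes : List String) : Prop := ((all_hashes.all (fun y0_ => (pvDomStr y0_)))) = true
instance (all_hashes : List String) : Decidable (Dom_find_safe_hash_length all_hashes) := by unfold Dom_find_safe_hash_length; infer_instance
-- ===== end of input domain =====

-- B replaces A's loop over candidate lengths (a set of truncated hashes per length) by one
-- pass over the pairs of hashes: answer = max(5, longest common prefix of any pair + 1).

-- ===== PORT A =====
-- the while loop: 'while hash_length <= max_length: … break / hash_length += 1'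
def pvGoA (hashes : List String) (max_length hash_length : Int) : Int :=
  if hash_length ≤ max_length then
    -- shortened_hashes = {h[:hash_length] for h in all_hashes}
    if (PySem.Set.ofList (hashes.map (fun h => PySem.Str.slice h none (some hash_length)))).length
        = hashes.length then
      hash_length
    else
      pvGoA hashes max_length (hash_length + 1)
  else hash_length
termination_by (max_length + 1 - hash_length).toNat
decreasing_by simp_wf; omega

def find_safe_hash_length (all_hashes : List String) : Int :=
  if all_hashes = [] then 5
  else
    let max_length : Int :=
      if all_hashes ≠ [] then PySem.Str.len (all_hashes.headD "") else 32
    pvGoA all_hashes max_length 5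

-- ===== PORT B =====
-- _lcp(a, b): length of the longest common prefix
def pvLcp : List Char → List Char → Int
  | a :: as, b :: bs => if a = b then 1 + pvLcp as bs else 0
  | _, _ => 0

-- 'for h in all_hashes: for p in seen: m = max(m, _lcp(h, p)); seen.append(h)'
def pvPairScan : List String → List String → Int → Int
  | [], _, m => m
  | h :: rest, seen, m =>
      pvPairScan rest (seen ++ [h])
        (seen.foldl (fun acc p => max acc (pvLcp h.toList p.toList)) m)

def find_safe_hash_length_alt (all_hashes : List String) : Int :=
  max 5 (pvPairScan all_hashes [] 0 + 1)

-- ===== PRECONDITION & SPEC =====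
-- Pre_ excludes multisets with repeated entries (a Python set cannot contain them) and
-- lists whose hashes differ in length while two hashes share their first 5 characters: there
-- A reads the length of next(iter(all_hashes)), so its result depends on the set's
-- hash-based iteration order and is not one determinate value.
def Pre_find_safe_hash_length (all_hashes : List String) : Prop :=
  all_hashes.Nodup ∧
  ((∀ h ∈ all_hashes, PySem.Str.len h = PySem.Str.len (all_hashes.headD "")) ∨
    all_hashes.Pairwise (fun a b => a.toList.take 5 ≠ b.toList.take 5))
instance (all_hashes : List String) : Decidable (Pre_find_safe_hash_length all_hashes) := by
  unfold Pre_find_safe_hash_length; infer_instance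

def pvWitness_find_safe_hash_length : List String := ["abcdef", "abcdeg", "zzzzzz"]

def Spec_find_safe_hash_length (all_hashes : List String) (out : Int) : Prop := out = find_safe_hash_length_alt all_hashes
instance (all_hashes : List String) (out : Int) : Decidable (Spec_find_safe_hash_length all_hashes out) := by unfold Spec_find_safe_hash_length; infer_instance

-- ===== CLAIM (what is proved, stated in full; the proofs are below) =====
def Claim_equal_find_safe_hash_length : Prop := ∀ (all_hashes : List String), Dom_find_safe_hash_length all_hashes → Pre_find_safe_hash_length all_hashes → Spec_find_safe_hash_length all_hashes (find_safe_hash_length all_hashes)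

-- ===== LEMMAS AND PROOFS =====

-- the truncation condition A tests at one candidate length
theorem pvLcp_nonneg (as bs : List Char) : 0 ≤ pvLcp as bs := by
  induction as generalizing bs with
  | nil => simp [pvLcp]
  | cons a as ih =>
    cases bs with
    | nil => simp [pvLcp]
    | cons b bs =>
      by_cases h : a = b
      · have := ih bs
        simp [pvLcp, h]
        omega
      · simp [pvLcp, h]

theorem pvLcp_comm (as bs : List Char) : pvLcp as bs = pvLcp bs as := by
  induction as generalizing bs with
  | nil => cases bs <;> simp [pvLcp]
  | cons a as ih =>
    cases bs with
    | nil => simp [pvLcp]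
    | cons b bs =>
      by_cases h : a = b
      · subst h; simp [pvLcp, ih]
      · simp only [pvLcp, if_neg h, if_neg (fun hh : b = a => h hh.symm)]

theorem pvLcp_take_iff (as bs : List Char) (hne : as ≠ bs) (k : Nat) :
    as.take k = bs.take k ↔ (k : Int) ≤ pvLcp as bs := by
  induction as generalizing bs k with
  | nil =>
    cases bs with
    | nil => exact absurd rfl hne
    | cons b bs =>
      simp only [pvLcp, List.take_nil]
      constructor
      · intro h
        cases k with
        | zero => simp
        | succ k => simp [List.take_succ_cons] at h
      · intro h
        have hk : k = 0 := by omega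
        simp [hk]
  | cons a as ih =>
    cases bs with
    | nil =>
      simp only [pvLcp, List.take_nil]
      constructor
      · intro h
        cases k with
        | zero => simp
        | succ k => simp [List.take_succ_cons] at h
      · intro h
        have hk : k = 0 := by omega
        simp [hk]
    | cons b bs =>
      by_cases hab : a = b
      · subst hab
        have hne' : as ≠ bs := by intro h; exact hne (by rw [h])
        cases k with
        | zero =>
          have h0 := pvLcp_nonneg as bs
          constructor
          · intro _
            simp only [pvLcp]
            push_cast
            omega
          · intro _
            simp
        | succ k =>
          simp only [List.take_succ_cons, List.cons.injEq, true_and, pvLcp]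
          rw [ih bs hne' k]
          push_cast; omega
      · simp only [pvLcp, if_neg hab]
        cases k with
        | zero => simp
        | succ k =>
          constructor
          · intro h
            have hab' : a = b := by
              have := congrArg (fun l => l.headD a) h
              simpa using this
            exact absurd hab' hab
          · intro h
            exact absurd h (by push_cast; omega)

theorem pvLcp_lt_length (as bs : List Char) (hne : as ≠ bs) (hlen : as.length = bs.length) :
    pvLcp as bs < (as.length : Int) := by
  induction as generalizing bs with
  | nil => cases bs with
    | nil => exact absurd rfl hne
    | cons b bs => simp at hlen
  | cons a as ih =>
    cases bs with
    | nil => simp at hlen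
    | cons b bs =>
      by_cases hab : a = b
      · subst hab
        have hne' : as ≠ bs := by intro h; exact hne (by rw [h])
        have := ih bs hne' (by simpa using hlen)
        simp only [pvLcp, List.length_cons]
        push_cast; omega
      · simp only [pvLcp, if_neg hab, List.length_cons]
        push_cast; omega

theorem pvFoldlMax_lt (f : String -> Int) (L : Int) :
    ∀ (seen : List String) (m : Int),
      seen.foldl (fun acc p => max acc (f p)) m < L ↔ m < L ∧ ∀ p ∈ seen, f p < L := by
  intro seen
  induction seen with
  | nil => simp
  | cons q seen ih =>
    intro m
    simp only [List.foldl_cons, ih, List.mem_cons]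
    constructor
    · rintro ⟨h1, h2⟩
      refine ⟨by omega, ?_⟩
      rintro p (rfl | hp)
      · omega
      · exact h2 p hp
    · rintro ⟨h1, h2⟩
      refine ⟨by have := h2 q (Or.inl rfl); omega, ?_⟩
      exact fun p hp => h2 p (Or.inr hp)

theorem pvPairScan_lt (L : Int) :
    ∀ (rest seen : List String) (m : Int),
      pvPairScan rest seen m < L ↔
        m < L ∧ (∀ a ∈ rest, ∀ b ∈ seen, pvLcp a.toList b.toList < L) ∧
          rest.Pairwise (fun a b => pvLcp a.toList b.toList < L) := by
  intro rest
  induction rest with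
  | nil => simp [pvPairScan]
  | cons x rest ih =>
    intro seen m
    rw [pvPairScan, ih, pvFoldlMax_lt]
    constructor
    · rintro ⟨⟨h1, h2⟩, h3, h4⟩
      refine ⟨h1, ?_, List.Pairwise.cons ?_ h4⟩
      · intro a ha b hb
        rcases List.mem_cons.mp ha with rfl | ha'
        · exact h2 b hb
        · exact h3 a ha' b (List.mem_append_left _ hb)
      · intro a ha
        rw [pvLcp_comm]
        exact h3 a ha x (List.mem_append_right _ (List.mem_singleton_self x))
    · rintro ⟨h1, h2, h3⟩
      rcases List.pairwise_cons.mp h3 with ⟨hx, h4⟩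
      refine ⟨⟨h1, fun p hp => h2 x (List.mem_cons_self ..) p hp⟩, ?_, h4⟩
      intro a ha b hb
      rcases List.mem_append.mp hb with hb' | hb'
      · exact h2 a (List.mem_cons_of_mem _ ha) b hb'
      · rw [List.mem_singleton.mp hb', pvLcp_comm]
        exact hx a ha

theorem pvOfList_length_eq_iff {α : Type} [BEq α] [LawfulBEq α] (xs : List α) :
    (PySem.Set.ofList xs).length = xs.length ↔ xs.Nodup := by
  induction xs using List.reverseRecOn with
  | nil => simp [PySem.Set.ofList]
  | append_singleton xs x ih =>
    rw [PySem.Set.ofList_append_singleton]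
    by_cases hx : x ∈ xs
    · have hx' : x ∈ PySem.Set.ofList xs := (PySem.Set.mem_ofList xs x).2 hx
      have hc : PySem.Set.contains (PySem.Set.ofList xs) x = true := by
        simpa [PySem.Set.contains] using hx'
      have hle := PySem.Set.length_ofList_le xs
      rw [show (PySem.Set.ofList xs).add x = PySem.Set.ofList xs from by
        simp only [PySem.Set.add, hc, reduceIte]]
      constructor
      · intro h
        exfalso
        rw [List.length_append, List.length_singleton] at h
        omega
      · intro h
        exfalso
        rcases List.nodup_append.mp h with ⟨-, -, hdis⟩
        exact hdis x hx x (List.mem_singleton_self x) rfl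
    · have hx' : x ∉ PySem.Set.ofList xs := fun h => hx ((PySem.Set.mem_ofList xs x).1 h)
      have hc : PySem.Set.contains (PySem.Set.ofList xs) x = false := by
        simpa [PySem.Set.contains] using hx'
      rw [show (PySem.Set.ofList xs).add x = PySem.Set.ofList xs ++ [x] from by
        simp only [PySem.Set.add, hc, Bool.false_eq_true, reduceIte]]
      simp only [List.length_append, List.length_singleton]
      constructor
      · intro h
        refine List.nodup_append.mpr ⟨ih.mp (by omega), List.nodup_singleton x, ?_⟩
        intro a ha b hb hab
        rw [List.mem_singleton.mp hb] at hab
        rw [hab] at ha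
        exact hx ha
      · intro h
        have := ih.mpr (List.nodup_append.mp h).1
        omega

-- A's while loop in closed form, given that the collision test at length hl is 'm < hl'
theorem pvGoA_eq (hashes : List String) (maxL m : Int) (_hm : 0 ≤ m)
    (hcond : ∀ hl : Int, 5 ≤ hl →
      (((PySem.Set.ofList (hashes.map (fun h => PySem.Str.slice h none (some hl)))).length
          = hashes.length) ↔ m < hl)) :
    ∀ (n : Nat) (hl : Int), 5 ≤ hl → (maxL + 1 - hl).toNat ≤ n →
      pvGoA hashes maxL hl = max hl (min m maxL + 1) := by
  intro n
  induction n with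
  | zero =>
    intro hl h5 hle
    rw [pvGoA, if_neg (by omega)]
    have h1 : min m maxL ≤ maxL := min_le_right _ _
    omega
  | succ n ih =>
    intro hl h5 hle
    rw [pvGoA]
    by_cases hcase : hl ≤ maxL
    · rw [if_pos hcase]
      by_cases hc : (PySem.Set.ofList (hashes.map (fun h => PySem.Str.slice h none (some hl)))).length = hashes.length
      · rw [if_pos hc]
        have hm' : m < hl := (hcond hl h5).1 hc
        have h1 : min m maxL ≤ m := min_le_left _ _
        omega
      · rw [if_neg hc]
        have hm' : hl ≤ m := by have := (hcond hl h5); omega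
        rw [ih (hl + 1) (by omega) (by omega)]
        have h1 : hl ≤ min m maxL := le_min hm' hcase
        omega
    · rw [if_neg hcase]
      have h1 : min m maxL ≤ maxL := min_le_right _ _
      omega

-- ===== VERDICT (by name: the statement is the Claim_ definition above) =====
theorem find_safe_hash_length_spec : Claim_equal_find_safe_hash_length := by
  intro hs _dom hpre
  obtain ⟨hnd, hlen⟩ := hpre
  unfold Spec_find_safe_hash_length
  cases hs with
  | nil => decide
  | cons h0 t =>
    set maxL : Int := PySem.Str.len ((h0 :: t).headD "") with hmaxL
    set m : Int := pvPairScan (h0 :: t) [] 0 with hmdef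
    have hm0 : 0 ≤ m := by
      by_contra h
      have := (pvPairScan_lt 0 (h0 :: t) [] 0).1 (by omega)
      omega
    -- the collision test at length hl is exactly 'm < hl'
    have hcond : ∀ hl : Int, 5 ≤ hl →
        (((PySem.Set.ofList ((h0 :: t).map (fun h => PySem.Str.slice h none (some hl)))).length
            = (h0 :: t).length) ↔ m < hl) := by
      intro hl h5
      have hmap : ((h0 :: t).map (fun h => PySem.Str.slice h none (some hl))).length = (h0 :: t).length :=
        List.length_map ..
      rw [← hmap, pvOfList_length_eq_iff]
      have hpair : ∀ a b : String, a ∈ h0 :: t → b ∈ h0 :: t → a ≠ b →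
          (PySem.Str.slice a none (some hl) ≠ PySem.Str.slice b none (some hl) ↔
            pvLcp a.toList b.toList < hl) := by
        intro a b _ _ hab
        have htl : a.toList ≠ b.toList := fun h => hab (String.toList_inj.mp h)
        have hslice : ∀ s : String, (PySem.Str.slice s none (some hl)).toList = s.toList.take hl.toNat := by
          intro s
          rw [PySem.Str.toList_slice, PySem.Chars.slice_eq_listSlice,
            PySem.List.slice_to s.toList (by omega : (0:Int) ≤ hl)]
        constructor
        · intro hne
          by_contra hge
          have : (hl.toNat : Int) ≤ pvLcp a.toList b.toList := by
            have := pvLcp_nonneg a.toList b.toList; omega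
          have heq := (pvLcp_take_iff a.toList b.toList htl hl.toNat).2 this
          exact hne (String.toList_inj.mp (by rw [hslice a, hslice b, heq]))
        · intro hlt heq
          have : a.toList.take hl.toNat = b.toList.take hl.toNat := by
            rw [← hslice a, ← hslice b, heq]
          have := (pvLcp_take_iff a.toList b.toList htl hl.toNat).1 this
          omega
      have hBm : m < hl ↔ (0 : Int) < hl ∧ (h0 :: t).Pairwise (fun a b => pvLcp a.toList b.toList < hl) := by
        rw [hmdef, pvPairScan_lt hl (h0 :: t) [] 0]
        simp
      rw [hBm]
      constructor
      · intro hnodup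
        refine ⟨by omega, ?_⟩
        have hp : (h0 :: t).Pairwise
            (fun a b => PySem.Str.slice a none (some hl) ≠ PySem.Str.slice b none (some hl)) := by
          simpa [List.Nodup, List.pairwise_map] using hnodup
        have hcomb := hnd.and hp
        exact hcomb.imp_of_mem (fun {a b} ha hb hab =>
          (hpair a b ha hb hab.1).1 hab.2)
      · rintro ⟨-, hp⟩
        have hcomb := hnd.and hp
        have : (h0 :: t).Pairwise
            (fun a b => PySem.Str.slice a none (some hl) ≠ PySem.Str.slice b none (some hl)) :=
          hcomb.imp_of_mem (fun {a b} ha hb hab => (hpair a b ha hb hab.1).2 hab.2)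
        simpa [List.Nodup, List.pairwise_map] using this
    -- A's side
    have hA : find_safe_hash_length (h0 :: t) = max 5 (min m maxL + 1) := by
      unfold find_safe_hash_length
      rw [if_neg (by simp)]
      simp only [if_pos (by simp : (h0 :: t) ≠ [])]
      exact pvGoA_eq (h0 :: t) maxL m hm0 hcond ((maxL + 1 - 5).toNat) 5 (by omega) (le_refl _)
    -- B's side
    have hB : find_safe_hash_length_alt (h0 :: t) = max 5 (m + 1) := by
      unfold find_safe_hash_length_alt
      rw [← hmdef]
    rw [hA, hB]
    have hmaxL' : maxL = (h0.toList.length : Int) := by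
      rw [hmaxL]; simp [PySem.Str.len_eq]
    rcases hlen with hlen | htake5
    · -- all hashes have the first hash's length: min m maxL = m, or t = [] and m = 0
      have hlen' : ∀ h ∈ h0 :: t, h.toList.length = h0.toList.length := by
        intro h hh
        have := hlen h hh
        simp only [PySem.Str.len_eq] at this
        rw [hmaxL'] at this
        exact_mod_cast this
      cases t with
      | nil =>
        have : m = 0 := by rw [hmdef]; rfl
        have : min m maxL = m := by rw [this, hmaxL']; omega
        rw [this]
      | cons h1 t' =>
        have hne01 : h0 ≠ h1 := by
          intro h
          rw [h] at hnd
          simp at hnd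
        have hlen1 : h1.toList.length = h0.toList.length := hlen' h1 (by simp)
        have hmlt : m < maxL := by
          rw [hmdef, pvPairScan_lt maxL (h0 :: h1 :: t') [] 0]
          have hmaxLpos : 0 < maxL := by
            rw [hmaxL']
            by_contra h
            have h0nil : h0.toList = [] := by
              have : h0.toList.length = 0 := by omega
              exact List.length_eq_zero_iff.mp this
            have h1nil : h1.toList = [] := by
              have : h1.toList.length = 0 := by omega
              exact List.length_eq_zero_iff.mp this
            exact hne01 (String.toList_inj.mp (by rw [h0nil, h1nil]))
          refine ⟨by omega, by simp, ?_⟩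
          exact hnd.imp_of_mem (fun {a b} ha hb hab => by
            have hla := hlen' a ha
            have hlb := hlen' b hb
            have htl : a.toList ≠ b.toList := fun h => hab (String.toList_inj.mp h)
            have := pvLcp_lt_length a.toList b.toList htl (by omega)
            rw [hmaxL']
            omega)
        have : min m maxL = m := by omega
        rw [this]
    · -- no two hashes share their first 5 characters: m < 5, both sides are 5
      have hm5 : m < 5 := by
        rw [hmdef, pvPairScan_lt 5 (h0 :: t) [] 0]
        refine ⟨by omega, by simp, ?_⟩
        have hcomb := hnd.and htake5
        exact hcomb.imp_of_mem (fun {a b} _ _ hab => by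
          have htl : a.toList ≠ b.toList := fun h => hab.1 (String.toList_inj.mp h)
          by_contra hge
          exact hab.2 ((pvLcp_take_iff a.toList b.toList htl 5).2 (by push_cast; omega)))
      have h1 : min m maxL ≤ m := min_le_left _ _
      omega
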